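-- pv_equiv track=rewrite | github.com/milanXpetrovic/dams_funcs | untitled1.py | individual_interval_analysis
-- ===== SOURCE A (Python) =====
-- from itertools import groupby
--
-- def individual_interval_analysis(column):
--     total_sleep = sum(column)
--     total_activity = len(column) - total_sleep
--
--     sleep_activity_intervals = [list(j) for i, j in groupby(column)]
--     sleep_activity_intervals.sort(key=len, reverse=True)
--
--     sleeping_intervals = [len(list) for list in sleep_activity_intervals if sum(list)>=1]
--     activity_intervals = [len(list) for list in sleep_activity_intervals if sum(list)<1]
--
--
--     try:
--         longest_sleep_interval = max(sleeping_intervals)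
--
--     except ValueError:
--         longest_sleep_interval = 0
--
--
--     amount_sleep_intervals = len(sleeping_intervals)
--
--     try:
--         longest_activity_interval = max(activity_intervals)
--
--     except ValueError:
--         longest_activity_interval = 0
--
--     amount_activity_intervals = len(activity_intervals)
--
--     return longest_sleep_interval, amount_sleep_intervals, longest_activity_interval, amount_activity_intervals, total_sleep, total_activity
-- ===== SOURCE B (Python) =====
-- def individual_interval_analysis(column):
--     # One pass over the run-length structure: no group lists, no sort.
--     longest_sleep = sleep_count = longest_activity = activity_count = 0
--     total_sleep = 0
--     i, n = 0, len(column)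
--     while i < n:
--         v = column[i]
--         j = i + 1
--         while j < n and column[j] == v:
--             j += 1
--         run = j - i
--         total_sleep += v * run
--         if v >= 1:
--             if longest_sleep < run:
--                 longest_sleep = run
--             sleep_count += 1
--         else:
--             if longest_activity < run:
--                 longest_activity = run
--             activity_count += 1
--         i = j
--     return longest_sleep, sleep_count, longest_activity, activity_count, total_sleep, n - total_sleep
-- ===== Notes on version B (the rewrite author's own statement) =====
-- stated objective: faster
-- what changed: Replaces groupby + building group lists + sorting them by length + two filter/max passes with a single index-based pass that detects each run in place and updates max-length/count/sum accumulators directly.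
import Mathlib
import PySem

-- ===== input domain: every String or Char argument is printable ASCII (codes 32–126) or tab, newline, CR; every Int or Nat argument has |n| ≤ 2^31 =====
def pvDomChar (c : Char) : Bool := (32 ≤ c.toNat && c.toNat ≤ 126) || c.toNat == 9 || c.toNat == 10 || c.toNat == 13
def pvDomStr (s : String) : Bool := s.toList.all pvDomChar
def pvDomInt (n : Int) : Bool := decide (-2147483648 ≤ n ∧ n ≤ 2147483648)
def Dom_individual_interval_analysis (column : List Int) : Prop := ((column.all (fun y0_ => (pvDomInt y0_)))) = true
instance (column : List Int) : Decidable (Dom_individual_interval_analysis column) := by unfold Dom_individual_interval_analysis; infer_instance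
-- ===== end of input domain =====

-- B replaces groupby + sort-by-length + filter/max passes with one in-place run-scanning pass (O(n) vs O(n log n)).


-- ===== PORT A =====
-- itertools.groupby over a list of ints: consecutive runs of equal elements, in order
def pyGroupby : List Int → List (List Int)
  | [] => []
  | x :: xs =>
      (x :: xs.takeWhile (fun y => y == x)) :: pyGroupby (xs.dropWhile (fun y => y == x))
termination_by l => l.length
decreasing_by
  simpa using Nat.lt_succ_of_le (List.length_dropWhile_le (fun y => y == x) xs)

def individual_interval_analysis (column : List Int) : List Int :=
  let total_sleep : Int := column.sum
  let total_activity : Int := (column.length : Int) - total_sleep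
  let sleep_activity_intervals := PySem.List.sorted (pyGroupby column) (fun g => g.length) true
  let sleeping_intervals := (sleep_activity_intervals.filter (fun g => decide (1 ≤ g.sum))).map (fun g => (g.length : Int))
  let activity_intervals := (sleep_activity_intervals.filter (fun g => decide (g.sum < 1))).map (fun g => (g.length : Int))
  let longest_sleep_interval : Int :=
    match PySem.List.max? sleeping_intervals (fun y => y) with
    | some m => m
    | none => 0
  let amount_sleep_intervals : Int := sleeping_intervals.length
  let longest_activity_interval : Int :=
    match PySem.List.max? activity_intervals (fun y => y) with
    | some m => m
    | none => 0
  let amount_activity_intervals : Int := activity_intervals.length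
  [longest_sleep_interval, amount_sleep_intervals, longest_activity_interval,
   amount_activity_intervals, total_sleep, total_activity]

-- ===== PORT B =====
-- B's while-loop: consume one run per step, updating the five accumulators
def bLoop : List Int → Int → Int → Int → Int → Int → Int × Int × Int × Int × Int
  | [], ls, sc, la, ac, ts => (ls, sc, la, ac, ts)
  | x :: xs, ls, sc, la, ac, ts =>
      let run : Int := 1 + (xs.takeWhile (fun y => y == x)).length
      let rest := xs.dropWhile (fun y => y == x)
      let ts' := ts + x * run
      if 1 ≤ x then
        bLoop rest (if ls < run then run else ls) (sc + 1) la ac ts'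
      else
        bLoop rest ls sc (if la < run then run else la) (ac + 1) ts'
termination_by l => l.length
decreasing_by
  all_goals simpa using Nat.lt_succ_of_le (List.length_dropWhile_le (fun y => y == x) xs)

def individual_interval_analysis_alt (column : List Int) : List Int :=
  match bLoop column 0 0 0 0 0 with
  | (ls, sc, la, ac, ts) => [ls, sc, la, ac, ts, (column.length : Int) - ts]

-- ===== PRECONDITION & SPEC =====
def Spec_individual_interval_analysis (column : List Int) (out : List Int) : Prop := out = individual_interval_analysis_alt column
instance (column : List Int) (out : List Int) : Decidable (Spec_individual_interval_analysis column out) := by unfold Spec_individual_interval_analysis; infer_instance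

-- ===== CLAIM (what is proved, stated in full; the proofs are below) =====
def Claim_equal_individual_interval_analysis : Prop := ∀ (column : List Int), Dom_individual_interval_analysis column → Spec_individual_interval_analysis column (individual_interval_analysis column)

-- ===== LEMMAS AND PROOFS =====

-- lengths of the sleep / activity runs of the UNSORTED group list
def sleepLens (l : List Int) : List Int :=
  ((pyGroupby l).filter (fun g => decide (1 ≤ g.sum))).map (fun g => (g.length : Int))
def actLens (l : List Int) : List Int :=
  ((pyGroupby l).filter (fun g => decide (g.sum < 1))).map (fun g => (g.length : Int))

theorem sum_of_const (x : Int) (l : List Int) (h : ∀ y ∈ l, y = x) :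
    l.sum = x * l.length := by
  induction l with
  | nil => simp
  | cons a t ih =>
      have ha := h a (by simp)
      have := ih (fun y hy => h y (by simp [hy]))
      simp [ha, this]; ring

theorem maxD_perm (ys zs : List Int) (h : ys.Perm zs) :
    (match PySem.List.max? ys (fun y => y) with | some m => m | none => (0 : Int)) =
    (match PySem.List.max? zs (fun y => y) with | some m => m | none => (0 : Int)) := by
  cases hy : PySem.List.max? ys (fun y => y) with
  | none =>
      have : ys = [] := (PySem.List.max?_eq_none_iff _ _).mp hy
      subst this
      have : zs = [] := h.symm.eq_nil
      simp [this, PySem.List.max?]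
  | some m =>
      cases hz : PySem.List.max? zs (fun y => y) with
      | none =>
          have : zs = [] := (PySem.List.max?_eq_none_iff _ _).mp hz
          subst this
          have hnil : ys = [] := h.eq_nil
          subst hnil
          exact absurd hy (by simp [PySem.List.max?])
      | some m' =>
          have hm : m ∈ ys := PySem.List.max?_mem hy
          have hm' : m' ∈ zs := PySem.List.max?_mem hz
          have h1 : m' ≤ m := PySem.List.max?_isMax hy m' (h.mem_iff.mpr hm')
          have h2 : m ≤ m' := PySem.List.max?_isMax hz m (h.mem_iff.mp hm)
          simp [le_antisymm h1 h2]

theorem maxD_eq_foldl (ys : List Int) (h : ∀ r ∈ ys, 0 ≤ r) :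
    (match PySem.List.max? ys (fun y => y) with | some m => m | none => (0 : Int)) =
    ys.foldl (fun a r => if a < r then r else a) 0 := by
  have hfun : (fun (a r : Int) => if a < r then r else a) = max := by
    funext a r
    rcases lt_or_ge a r with hc | hc
    · simp [hc, max_eq_right hc.le]
    · simp [not_lt.mpr hc, max_eq_left hc]
  cases ys with
  | nil => simp [PySem.List.max?]
  | cons y t =>
      rw [PySem.List.max?_id_cons, hfun]
      have h0 : max 0 y = y := max_eq_right (h y (by simp))
      simp [List.foldl, h0]

-- the master invariant: one bLoop step consumes exactly one group of pyGroupby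
theorem bLoop_spec (l : List Int) : ∀ (ls sc la ac ts : Int),
    bLoop l ls sc la ac ts =
      (((sleepLens l).foldl (fun a r => if a < r then r else a) ls),
       sc + (sleepLens l).length,
       ((actLens l).foldl (fun a r => if a < r then r else a) la),
       ac + (actLens l).length,
       ts + l.sum) := by
  induction l using pyGroupby.induct with
  | case1 =>
      intro ls sc la ac ts
      simp [bLoop, sleepLens, actLens, pyGroupby]
  | case2 x xs ih =>
      intro ls sc la ac ts
      set tw := xs.takeWhile (fun y => y == x) with htw
      set rest := xs.dropWhile (fun y => y == x) with hrest
      have hconst : ∀ y ∈ (x :: tw), y = x := by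
        intro y hy
        rcases List.mem_cons.mp hy with h | h
        · exact h
        · have := List.mem_takeWhile_imp (htw ▸ h)
          exact eq_of_beq this
      have hsum : (x :: tw).sum = x * (1 + (tw.length : Int)) := by
        have := sum_of_const x (x :: tw) hconst
        simpa [add_comm] using this
      have hrun : (1 : Int) ≤ 1 + (tw.length : Int) := by omega
      have hsplit : (x :: xs).sum = x * (1 + (tw.length : Int)) + rest.sum := by
        have : x :: xs = (x :: tw) ++ rest := by
          simp [htw, hrest, List.takeWhile_append_dropWhile]
        rw [this, List.sum_append, hsum]
      have hgroup : pyGroupby (x :: xs) = (x :: tw) :: pyGroupby rest := by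
        rw [pyGroupby]
      by_cases hx : 1 ≤ x
      · have hs : (1 : Int) ≤ (x :: tw).sum := by
          rw [hsum]; nlinarith
        have hs' : (1 : Int) ≤ x + tw.sum := by simpa using hs
        have hsl : sleepLens (x :: xs) = (1 + (tw.length : Int)) :: sleepLens rest := by
          simp [sleepLens, hgroup, hs']
          ring
        have hal : actLens (x :: xs) = actLens rest := by
          simp [actLens, hgroup, not_lt.mpr hs']
        rw [bLoop]
        simp only [htw, hrest] at *
        rw [if_pos hx, ih, hsl, hal, hsplit]
        simp [List.foldl, add_comm, add_assoc, add_left_comm]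
      · have hs : (x :: tw).sum < 1 := by
          rw [hsum]
          have hx' : x ≤ 0 := by omega
          nlinarith
        have hs' : x + tw.sum < 1 := by simpa using hs
        have hsl : sleepLens (x :: xs) = sleepLens rest := by
          simp [sleepLens, hgroup, not_le.mpr hs']
        have hal : actLens (x :: xs) = (1 + (tw.length : Int)) :: actLens rest := by
          simp [actLens, hgroup, hs']
          ring
        rw [bLoop]
        simp only [htw, hrest] at *
        rw [if_neg hx, ih, hsl, hal, hsplit]
        simp [List.foldl, add_comm, add_assoc, add_left_comm]

-- every group of pyGroupby is nonempty, so every recorded run length is ≥ 1 ≥ 0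
theorem lens_nonneg (l : List Int) :
    (∀ r ∈ sleepLens l, (0 : Int) ≤ r) ∧ (∀ r ∈ actLens l, (0 : Int) ≤ r) := by
  constructor <;>
  · intro r hr
    simp only [sleepLens, actLens, List.mem_map, List.mem_filter] at hr
    obtain ⟨g, _, rfl⟩ := hr
    exact Int.natCast_nonneg _

-- ===== VERDICT (by name: the statement is the Claim_ definition above) =====
theorem individual_interval_analysis_spec : Claim_equal_individual_interval_analysis := by
  intro column _
  unfold Spec_individual_interval_analysis individual_interval_analysis individual_interval_analysis_alt
  rw [bLoop_spec]
  have hperm : (PySem.List.sorted (pyGroupby column) (fun g => g.length) true).Perm (pyGroupby column) :=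
    PySem.List.sorted_perm _ _ _
  have hpermS :
      ((PySem.List.sorted (pyGroupby column) (fun g => g.length) true).filter
        (fun g => decide (1 ≤ g.sum))).map (fun g => (g.length : Int)) |>.Perm (sleepLens column) :=
    (hperm.filter _).map _
  have hpermA :
      ((PySem.List.sorted (pyGroupby column) (fun g => g.length) true).filter
        (fun g => decide (g.sum < 1))).map (fun g => (g.length : Int)) |>.Perm (actLens column) :=
    (hperm.filter _).map _
  have hS := (maxD_perm _ _ hpermS).trans (maxD_eq_foldl _ (lens_nonneg column).1)
  have hA := (maxD_perm _ _ hpermA).trans (maxD_eq_foldl _ (lens_nonneg column).2)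
  simp only []
  rw [hS, hA, hpermS.length_eq, hpermA.length_eq]
  simp [sleepLens, actLens]
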